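-- pv_equiv track=rewrite | github.com/wingedonezero/Video-Sync-GUI | vsg/opts.py | pretty_print_tokens
-- ===== SOURCE A (Python) =====
-- from typing import List, Optional
--
-- def pretty_print_tokens(argv: List[str]) -> str:
--     """Return a human-readable pretty view of argv similar to the logs."""
--     out = []
--     i = 0
--     line = []
--     for tok in argv:
--         if tok in {"mkvmerge"}:
--             continue
--         if tok in {"--output", "--chapters", "--sync", "--compression", "--default-track-flag", "--language", "--track-name", "--attach-file"}:
--             if line:
--                 out.append(" ".join(line))
--                 line = []
--         line.append(tok)
--     if line:
--         out.append(" ".join(line))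
--     return "\n".join(out)
-- ===== SOURCE B (Python) =====
-- _BOUNDARY = {"--output", "--chapters", "--sync", "--compression",
--              "--default-track-flag", "--language", "--track-name", "--attach-file"}
--
-- def _segments(toks):
--     """Cut toks into segments: each segment is a head token followed by the
--     longest run of non-boundary tokens after it."""
--     segs = []
--     i, n = 0, len(toks)
--     while i < n:
--         j = i + 1
--         while j < n and toks[j] not in _BOUNDARY:
--             j += 1
--         segs.append(toks[i:j])
--         i = j
--     return segs
--
-- def pretty_print_tokens(argv):
--     toks = [t for t in argv if t != "mkvmerge"]
--     return "\n".join(" ".join(seg) for seg in _segments(toks))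
-- ===== Notes on version B (the rewrite author's own statement) =====
-- stated objective: simpler
-- what changed: Replaces the flush-on-boundary accumulator (mutable out/line state) by a recursive greedy split: filter once, then cut the token list into segments, each a head token plus its longest following run of non-boundary tokens, and join the segments.
import Mathlib
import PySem

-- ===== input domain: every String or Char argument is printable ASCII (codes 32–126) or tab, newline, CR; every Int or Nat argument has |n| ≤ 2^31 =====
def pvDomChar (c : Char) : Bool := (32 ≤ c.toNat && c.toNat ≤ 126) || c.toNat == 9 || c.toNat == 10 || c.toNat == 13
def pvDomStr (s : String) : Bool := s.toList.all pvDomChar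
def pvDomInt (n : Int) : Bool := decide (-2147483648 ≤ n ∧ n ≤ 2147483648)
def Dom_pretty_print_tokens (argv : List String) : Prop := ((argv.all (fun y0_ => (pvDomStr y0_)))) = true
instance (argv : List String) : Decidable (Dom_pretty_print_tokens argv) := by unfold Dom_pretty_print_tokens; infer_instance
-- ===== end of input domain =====

-- B replaces A's flush-on-boundary accumulator by a recursive greedy split into segments; objective: simpler.

-- membership in the boundary-option set (shared literal set of both programs)
def pvBound (tok : String) : Bool :=
  tok == "--output" || tok == "--chapters" || tok == "--sync" || tok == "--compression" ||
  tok == "--default-track-flag" || tok == "--language" || tok == "--track-name" || tok == "--attach-file"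

-- ===== PORT A =====
-- one iteration of A's for-loop over state (out, line)
def pvStepA (st : List String × List String) (tok : String) : List String × List String :=
  if tok == "mkvmerge" then st
  else
    let st' := if pvBound tok then (if st.2 = [] then st else (st.1 ++ [PySem.Str.join " " st.2], [])) else st
    (st'.1, st'.2 ++ [tok])

def pretty_print_tokens (argv : List String) : String :=
  let st := argv.foldl pvStepA ([], [])
  let out := if st.2 = [] then st.1 else st.1 ++ [PySem.Str.join " " st.2]
  PySem.Str.join "\n" out

-- ===== PORT B =====
-- _segments: head token plus the longest following run of non-boundary tokens, recursively
def pvSegments : List String → List (List String)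
  | [] => []
  | t :: rest =>
    (t :: rest.takeWhile (fun s => !pvBound s)) :: pvSegments (rest.dropWhile (fun s => !pvBound s))
termination_by l => l.length
decreasing_by
  exact Nat.lt_succ_of_le (List.length_dropWhile_le _ _)

def pretty_print_tokens_alt (argv : List String) : String :=
  PySem.Str.join "\n"
    ((pvSegments (argv.filter (fun t => t != "mkvmerge"))).map (fun seg => PySem.Str.join " " seg))

-- ===== PRECONDITION & SPEC =====
def Spec_pretty_print_tokens (argv : List String) (out : String) : Prop := out = pretty_print_tokens_alt argv
instance (argv : List String) (out : String) : Decidable (Spec_pretty_print_tokens argv out) := by unfold Spec_pretty_print_tokens; infer_instance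

-- ===== CLAIM (what is proved, stated in full; the proofs are below) =====
def Claim_equal_pretty_print_tokens : Prop := ∀ (argv : List String), Dom_pretty_print_tokens argv → Spec_pretty_print_tokens argv (pretty_print_tokens argv)

-- ===== LEMMAS AND PROOFS =====

-- A's fold ignores "mkvmerge" tokens, so it equals the fold over the filtered list
theorem pv_foldl_filter (argv : List String) (st : List String × List String) :
    argv.foldl pvStepA st = (argv.filter (fun t => t != "mkvmerge")).foldl pvStepA st := by
  induction argv generalizing st with
  | nil => rfl
  | cons t rest ih =>
    by_cases h : t = "mkvmerge"
    · subst h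
      simp [List.filter, pvStepA, ih]
    · rw [List.filter_cons]
      have hb : (t != "mkvmerge") = true := by simp [h]
      simp [hb, List.foldl, ih]

-- reference segmentation: segments produced with current (nonempty) line and remaining tokens
def pvF : List String → List String → List (List String)
  | [], line => [line]
  | t :: rest, line => if pvBound t then line :: pvF rest [t] else pvF rest (line ++ [t])

-- A's loop from state (out, line) with line ≠ [] produces out ++ joined segments of pvF
theorem pv_loop_eq (toks : List String) (out line : List String)
    (hline : line ≠ []) (hmk : ∀ t ∈ toks, t ≠ "mkvmerge") :
    (let st := toks.foldl pvStepA (out, line)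
     if st.2 = [] then st.1 else st.1 ++ [PySem.Str.join " " st.2]) =
      out ++ (pvF toks line).map (fun seg => PySem.Str.join " " seg) := by
  induction toks generalizing out line with
  | nil => simp [pvF, hline]
  | cons t rest ih =>
    have ht : t ≠ "mkvmerge" := hmk t (by simp)
    have hrest : ∀ u ∈ rest, u ≠ "mkvmerge" := fun u hu => hmk u (by simp [hu])
    by_cases hb : pvBound t
    · have := ih (out ++ [PySem.Str.join " " line]) [t] (by simp) hrest
      simp [List.foldl, pvStepA, ht, hb, hline, pvF, this]
    · have := ih out (line ++ [t]) (by simp) hrest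
      simp [List.foldl, pvStepA, ht, hb, pvF, this]

-- pvF with a nonempty line is the line extended by the non-boundary run, then pvSegments of the rest
theorem pv_F_eq_segments (toks : List String) (line : List String) :
    pvF toks line =
      (line ++ toks.takeWhile (fun s => !pvBound s)) ::
        pvSegments (toks.dropWhile (fun s => !pvBound s)) := by
  induction toks generalizing line with
  | nil => simp [pvF, pvSegments]
  | cons t rest ih =>
    by_cases hb : pvBound t
    · simp [pvF, hb, List.takeWhile, List.dropWhile, pvSegments, ih]
    · simp [pvF, hb, List.takeWhile, List.dropWhile, ih]

-- ===== VERDICT (by name: the statement is the Claim_ definition above) =====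
theorem pretty_print_tokens_spec : Claim_equal_pretty_print_tokens := by
  intro argv _
  unfold Spec_pretty_print_tokens pretty_print_tokens pretty_print_tokens_alt
  rw [pv_foldl_filter]
  have hmk : ∀ t ∈ argv.filter (fun t => t != "mkvmerge"), t ≠ "mkvmerge" := by
    intro t ht
    have := List.of_mem_filter ht
    simpa using this
  cases hf : argv.filter (fun t => t != "mkvmerge") with
  | nil => simp [pvSegments]
  | cons t rest =>
    rw [hf] at hmk
    have ht : t ≠ "mkvmerge" := hmk t (by simp)
    have hrest : ∀ u ∈ rest, u ≠ "mkvmerge" := fun u hu => hmk u (by simp [hu])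
    have hstep : pvStepA ([], []) t = ([], [t]) := by
      by_cases hb : pvBound t <;> simp [pvStepA, ht, hb]
    have hloop := pv_loop_eq rest [] [t] (by simp) hrest
    simp only [List.foldl, hstep] at *
    rw [hloop, pv_F_eq_segments]
    simp [pvSegments]
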